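-- pv_equiv track=rewrite | github.com/faizman31/MNIST_FCN_DNN | utils.py | get_hidden_size
-- ===== SOURCE A (Python) =====
-- def get_hidden_size(input_size,output_size,n_layers):
--     step_size = int((input_size - output_size) / n_layers)
--
--     hidden_sizes=[]
--     current_size=input_size
--
--     for i in range(n_layers-1):
--         hidden_sizes += [current_size - step_size]
--         current_size = hidden_sizes[-1]
--
--     return hidden_sizes
-- ===== SOURCE B (Python) =====
-- def get_hidden_size(input_size, output_size, n_layers):
--     step_size = int((input_size - output_size) / n_layers)
--     return [input_size - step_size * (i + 1) for i in range(n_layers - 1)]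
-- ===== Notes on version B (the rewrite author's own statement) =====
-- stated objective: simpler
-- what changed: Replaces the loop that threads a running current_size accumulator (re-reading hidden_sizes[-1] each iteration) with a direct closed-form computation of each element from its index, input_size - step_size*(i+1).
import Mathlib
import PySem

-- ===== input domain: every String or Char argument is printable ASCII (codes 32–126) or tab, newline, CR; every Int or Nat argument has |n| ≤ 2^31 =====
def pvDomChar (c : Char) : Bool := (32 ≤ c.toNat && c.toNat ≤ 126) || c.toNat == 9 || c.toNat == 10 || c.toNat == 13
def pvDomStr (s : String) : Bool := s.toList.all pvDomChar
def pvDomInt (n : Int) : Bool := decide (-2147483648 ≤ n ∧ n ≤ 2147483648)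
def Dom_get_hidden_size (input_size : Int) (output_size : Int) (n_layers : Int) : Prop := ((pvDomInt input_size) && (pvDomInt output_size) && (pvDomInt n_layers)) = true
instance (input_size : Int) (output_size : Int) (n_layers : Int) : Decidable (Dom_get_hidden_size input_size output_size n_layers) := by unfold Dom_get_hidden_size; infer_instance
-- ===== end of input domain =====

-- B replaces A's running current_size accumulator with a closed-form per-index
-- computation input_size - step_size*(i+1); same O(n) cost, plainer code.


-- ===== PORT A =====
-- loop body of A: append current_size - step_size, then re-read hidden_sizes[-1]
def ghsStep (step : Int) (st : List Int × Int) (_i : Int) : List Int × Int :=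
  let hidden_sizes := st.1 ++ [st.2 - step]
  (hidden_sizes, (PySem.List.pyGet? hidden_sizes (-1)).getD 0)

def get_hidden_size (input_size : Int) (output_size : Int) (n_layers : Int) : List Int :=
  let step_size := PySem.Int.truncdiv (input_size - output_size) n_layers
  let st := (PySem.List.pyRange 0 (n_layers - 1) 1).foldl (ghsStep step_size) ([], input_size)
  st.1

-- ===== PORT B =====
def get_hidden_size_alt (input_size : Int) (output_size : Int) (n_layers : Int) : List Int :=
  let step_size := PySem.Int.truncdiv (input_size - output_size) n_layers
  (PySem.List.pyRange 0 (n_layers - 1) 1).map (fun i => input_size - step_size * (i + 1))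

-- ===== PRECONDITION & SPEC =====
-- Pre_ excludes only n_layers = 0, where A raises ZeroDivisionError.
def Pre_get_hidden_size (input_size : Int) (output_size : Int) (n_layers : Int) : Prop := n_layers ≠ 0
instance (input_size : Int) (output_size : Int) (n_layers : Int) : Decidable (Pre_get_hidden_size input_size output_size n_layers) := by unfold Pre_get_hidden_size; infer_instance
def pvWitness_get_hidden_size : Int × Int × Int := (10, 2, 4)

def Spec_get_hidden_size (input_size : Int) (output_size : Int) (n_layers : Int) (out : List Int) : Prop := out = get_hidden_size_alt input_size output_size n_layers
instance (input_size : Int) (output_size : Int) (n_layers : Int) (out : List Int) : Decidable (Spec_get_hidden_size input_size output_size n_layers out) := by unfold Spec_get_hidden_size; infer_instance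

-- ===== CLAIM (what is proved, stated in full; the proofs are below) =====
def Claim_equal_get_hidden_size : Prop := ∀ (input_size : Int) (output_size : Int) (n_layers : Int), Dom_get_hidden_size input_size output_size n_layers → Pre_get_hidden_size input_size output_size n_layers → Spec_get_hidden_size input_size output_size n_layers (get_hidden_size input_size output_size n_layers)

-- ===== LEMMAS AND PROOFS =====

-- A's loop, started at (hs, cur), appends cur - step*(k+1) at position k.
theorem get_hidden_size_loop (step : Int) (l : List Int) (hs : List Int) (cur : Int) :
    (l.foldl (ghsStep step) (hs, cur)).1
    = hs ++ (List.range l.length).map (fun (k : Nat) => cur - step * ((k : Int) + 1)) := by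
  induction l generalizing hs cur with
  | nil => simp
  | cons x t ih =>
      rw [List.foldl_cons]
      have hstep : ghsStep step (hs, cur) x = (hs ++ [cur - step], cur - step) := by
        simp [ghsStep, PySem.List.pyGet?_neg_one_append_singleton]
      rw [hstep, ih]
      rw [List.length_cons, List.range_succ_eq_map, List.map_cons, List.map_map]
      simp only [List.append_assoc, List.singleton_append]
      congr 1
      congr 1
      · ring
      · apply List.map_congr_left
        intro k _
        simp only [Function.comp_apply]
        push_cast
        ring

-- ===== VERDICT (by name: the statement is the Claim_ definition above) =====
theorem get_hidden_size_spec : Claim_equal_get_hidden_size := by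
  intro input_size output_size n_layers _ _
  unfold Spec_get_hidden_size get_hidden_size get_hidden_size_alt
  rw [get_hidden_size_loop, PySem.List.pyRange_one, List.length_map, List.length_range, List.map_map]
  simp only [List.nil_append]
  apply List.map_congr_left
  intro k _
  simp only [Function.comp_apply]
  ring
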